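-- pv_equiv track=rewrite | github.com/robhoc/AoC21 | src/AoC_Day14.py | createHistoFromStringButFirstChar
-- ===== SOURCE A (Python) =====
-- def createHistoFromStringButFirstChar(string):
--     histogram = {}
--     for i in range(len(string)):
--         if i:
--             c = string[i]
--             if c in histogram:
--                 histogram[c] = histogram[c] + 1
--             else:
--                 histogram[c] = 1
--     return histogram
-- ===== SOURCE B (Python) =====
-- def createHistoFromStringButFirstChar(string):
--     # Two-pass strategy: dedup the tail (first-occurrence order), then count each
--     # distinct character once, instead of walking indices and incrementing.
--     tail = list(string[1:])
--     return {c: tail.count(c) for c in dict.fromkeys(tail)}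
-- ===== Notes on version B (the rewrite author's own statement) =====
-- stated objective: alternative
-- what changed: Replaces A's index-walking increment loop over a mutable dict with a two-pass construction: dedup the tail in first-occurrence order, then count each distinct character once with list.count.
import Mathlib
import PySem

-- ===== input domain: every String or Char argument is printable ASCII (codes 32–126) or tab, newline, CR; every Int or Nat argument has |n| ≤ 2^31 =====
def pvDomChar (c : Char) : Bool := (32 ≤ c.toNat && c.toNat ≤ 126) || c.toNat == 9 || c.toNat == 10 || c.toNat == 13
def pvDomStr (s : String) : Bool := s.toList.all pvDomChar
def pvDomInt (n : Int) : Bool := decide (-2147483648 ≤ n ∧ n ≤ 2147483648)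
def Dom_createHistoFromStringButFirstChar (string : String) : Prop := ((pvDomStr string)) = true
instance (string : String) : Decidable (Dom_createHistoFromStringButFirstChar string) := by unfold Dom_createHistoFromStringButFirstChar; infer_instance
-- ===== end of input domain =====

-- B replaces A's index-walking increment loop with dedup-the-tail then count-per-distinct-character; same cost class, alternative decomposition.


-- ===== PORT A =====
def createHistoFromStringButFirstChar (string : String) : List (String × Int) :=
  ((PySem.List.pyRange 0 (PySem.Str.len string) 1).foldl
    (fun (histogram : PySem.Dict String Int) i =>
      if i ≠ 0 then
        match PySem.Str.pyGet? string i with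
        | some ch =>
          -- string[i] in Python is a 1-character string: the Char wrapped as a String key
          if histogram.contains (String.ofList [ch]) then
            histogram.insert (String.ofList [ch]) (histogram.getD (String.ofList [ch]) 0 + 1)
          else
            histogram.insert (String.ofList [ch]) 1
        | none => histogram  -- unreachable: 0 ≤ i < len(string)
      else histogram)
    PySem.Dict.empty).items

-- ===== PORT B =====
def createHistoFromStringButFirstChar_alt (string : String) : List (String × Int) :=
  -- list(string[1:]): the tail's characters as 1-character strings (exact: Python iterates a str as 1-char strings)
  let tail : List String := (PySem.Str.slice string (some 1) none).toList.map (fun ch => String.ofList [ch])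
  (PySem.List.dedup tail).map (fun c => (c, (tail.count c : Int)))

-- ===== PRECONDITION & SPEC =====
def Spec_createHistoFromStringButFirstChar (string : String) (out : List (String × Int)) : Prop := out = createHistoFromStringButFirstChar_alt string
instance (string : String) (out : List (String × Int)) : Decidable (Spec_createHistoFromStringButFirstChar string out) := by unfold Spec_createHistoFromStringButFirstChar; infer_instance

-- ===== CLAIM (what is proved, stated in full; the proofs are below) =====
def Claim_equal_createHistoFromStringButFirstChar : Prop := ∀ (string : String), Dom_createHistoFromStringButFirstChar string → Spec_createHistoFromStringButFirstChar string (createHistoFromStringButFirstChar string)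

-- ===== LEMMAS AND PROOFS =====

-- in-range indexing returns `some` of the defaulted value
theorem pv_pyGet?_eq_some_pyGetD {α : Type} (xs : List α) (i : Int) (d : α)
    (h0 : 0 ≤ i) (h1 : i < (xs.length : Int)) :
    PySem.List.pyGet? xs i = some (PySem.List.pyGetD xs i d) := by
  simp [PySem.List.pyGetD, PySem.List.pyGet?, PySem.List.pyIdx?, h0, h1]

-- string[1:] is the tail of the character list
theorem pv_slice_one_toList (s : String) :
    (PySem.Str.slice s (some 1) none).toList = s.toList.drop 1 := by
  simp [PySem.Str.slice, PySem.List.slice]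
  rw [← String.length_toList]
  cases s.toList with
  | nil => simp
  | cons c l => simp

-- ===== VERDICT (by name: the statement is the Claim_ definition above) =====
theorem createHistoFromStringButFirstChar_spec : Claim_equal_createHistoFromStringButFirstChar := by
  intro s _
  unfold Spec_createHistoFromStringButFirstChar createHistoFromStringButFirstChar createHistoFromStringButFirstChar_alt
  rw [pv_slice_one_toList, PySem.Str.len_eq]
  cases hcs : s.toList with
  | nil => simp [PySem.List.pyRange_one_eq_nil, PySem.List.dedup, PySem.Set.ofList, PySem.Dict.empty]
  | cons c rest =>
    have hlen : (0 : Int) < ((c :: rest).length : Int) := by simp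
    rw [PySem.List.pyRange_one_cons hlen]
    simp only [List.foldl_cons]
    rw [if_neg (by simp), show (0 : Int) + 1 = 1 from rfl]
    rw [PySem.List.foldl_congr_mem _ _
      (fun (histogram : PySem.Dict String Int) i =>
        histogram.insert (String.ofList [PySem.List.pyGetD (c :: rest) i 'a'])
          (histogram.getD (String.ofList [PySem.List.pyGetD (c :: rest) i 'a']) 0 + 1)) _
      (by
        intro acc i hi
        have hb := PySem.List.mem_pyRange_one.1 hi
        have hget : PySem.Str.pyGet? s i = some (PySem.List.pyGetD (c :: rest) i 'a') := by
          unfold PySem.Str.pyGet? PySem.Chars.pyGet?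
          rw [hcs]
          exact pv_pyGet?_eq_some_pyGetD _ _ _ (by omega) (by exact_mod_cast hb.2)
        rw [if_pos (by omega : i ≠ 0), hget]
        by_cases hc : acc.contains (String.ofList [PySem.List.pyGetD (c :: rest) i 'a'])
        · simp [hc]
        · simp [hc, PySem.Dict.getD_of_not_contains acc 0 (by simpa using hc)])]
    rw [PySem.List.foldl_pyRange_pyGetD' (c :: rest) 'a'
      (fun (h : PySem.Dict String Int) ch =>
        h.insert (String.ofList [ch]) (h.getD (String.ofList [ch]) 0 + 1))
      PySem.Dict.empty (by norm_num)]
    simp only [Int.toNat_one, List.drop_succ_cons, List.drop_zero]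
    rw [show rest.foldl
        (fun (h : PySem.Dict String Int) ch =>
          h.insert (String.ofList [ch]) (h.getD (String.ofList [ch]) 0 + 1)) PySem.Dict.empty
      = (rest.map (fun ch => String.ofList [ch])).foldl
          (fun (h : PySem.Dict String Int) k => h.insert k (h.getD k 0 + 1)) PySem.Dict.empty
      from (List.foldl_map (f := fun ch => String.ofList [ch])
          (g := fun (h : PySem.Dict String Int) k => h.insert k (h.getD k 0 + 1))
          (l := rest) (init := PySem.Dict.empty)).symm]
    rw [PySem.Dict.foldl_insert_getD_add_one_eq_counter, PySem.Dict.items_counter,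
      PySem.List.dedup_eq_ofList]
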